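-- pv_equiv track=rewrite | github.com/openeuler-mirror/yuanrong | scripts/format_cpp.py | fix_long_lines
-- ===== SOURCE A (Python) =====
-- from typing import List, Tuple, Optional
--
-- MAX_LINE_WIDTH = 120
--
-- def fix_long_lines(content: str) -> Tuple[str, int]:
--     """G.FMT.05-CPP: Break lines exceeding 120 characters"""
--     count = 0
--     lines = content.split('\n')
--     new_lines = []
--
--     for line in lines:
--         if len(line) > MAX_LINE_WIDTH:
--             stripped = line.lstrip()
--
--             # Skip long URLs in comments
--             if stripped.startswith('//') and ('http' in stripped or 'https' in stripped):
--                 new_lines.append(line)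
--                 continue
--
--             # Skip preprocessor directives
--             if stripped.startswith('#'):
--                 new_lines.append(line)
--                 continue
--
--             # Try to break at logical points
--             indent = len(line) - len(line.lstrip())
--             indent_str = ' ' * (indent + 4)
--
--             new_line = line
--
--             # Try breaking at common points: comma followed by space
--             if ',' in line and '(' in line:
--                 # Find a good break point
--                 parts = []
--                 current = ""
--                 paren_depth = 0
--                 i = 0
--                 while i < len(line):
--                     char = line[i]
--                     if char == '(':
--                         paren_depth += 1
--                     elif char == ')':
--                         paren_depth -= 1
--                     elif char == ',' and paren_depth == 0:
--                         if len(current) > 80:  # Break before 120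
--                             parts.append(current + ',')
--                             current = indent_str
--                             i += 1  # Skip the comma we already added
--                             while i < len(line) and line[i] == ' ':
--                                 i += 1  # Skip spaces after comma
--                             continue
--                     current += char
--                     i += 1
--
--                 if parts:
--                     parts.append(current)
--                     new_line = '\n'.join(parts)
--                     count += 1
--
--             new_lines.append(new_line)
--         else:
--             new_lines.append(line)
--
--     return '\n'.join(new_lines), count
-- ===== SOURCE B (Python) =====
-- from typing import Tuple
--
-- MAX_LINE_WIDTH = 120
--
-- def _split_top(line: str):
--     """Split line into the pieces between top-level (paren-depth 0) commas."""
--     segs = []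
--     cur = ""
--     depth = 0
--     for ch in line:
--         if ch == '(':
--             depth += 1
--             cur += ch
--         elif ch == ')':
--             depth -= 1
--             cur += ch
--         elif ch == ',' and depth == 0:
--             segs.append(cur)
--             cur = ""
--         else:
--             cur += ch
--     segs.append(cur)
--     return segs
--
-- def fix_long_lines(content: str) -> Tuple[str, int]:
--     """G.FMT.05-CPP: Break lines exceeding 120 characters"""
--     count = 0
--     new_lines = []
--
--     for line in content.split('\n'):
--         if len(line) <= MAX_LINE_WIDTH:
--             new_lines.append(line)
--             continue
--
--         stripped = line.lstrip()
--         if stripped.startswith('//') and 'http' in stripped: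
--             new_lines.append(line)
--             continue
--         if stripped.startswith('#'):
--             new_lines.append(line)
--             continue
--
--         new_line = line
--         if ',' in line and '(' in line:
--             indent_str = ' ' * (len(line) - len(stripped) + 4)
--             segs = _split_top(line)
--             parts = []
--             current = segs[0]
--             for seg in segs[1:]:
--                 if len(current) > 80:
--                     parts.append(current + ',')
--                     current = indent_str + seg.lstrip(' ')
--                 else:
--                     current = current + ',' + seg
--             if parts:
--                 parts.append(current)
--                 new_line = '\n'.join(parts)
--                 count += 1
--         new_lines.append(new_line)
--
--     return '\n'.join(new_lines), count
-- ===== Notes on version B (the rewrite author's own statement) =====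
-- stated objective: alternative
-- what changed: A's single stateful character scan with in-loop index manipulation (skipping the comma and following spaces by advancing i) is replaced by a two-pass decomposition: first split the line into segments between top-level (paren-depth-0) commas, then greedily merge those segments into parts with an 80-character threshold.
import Mathlib
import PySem

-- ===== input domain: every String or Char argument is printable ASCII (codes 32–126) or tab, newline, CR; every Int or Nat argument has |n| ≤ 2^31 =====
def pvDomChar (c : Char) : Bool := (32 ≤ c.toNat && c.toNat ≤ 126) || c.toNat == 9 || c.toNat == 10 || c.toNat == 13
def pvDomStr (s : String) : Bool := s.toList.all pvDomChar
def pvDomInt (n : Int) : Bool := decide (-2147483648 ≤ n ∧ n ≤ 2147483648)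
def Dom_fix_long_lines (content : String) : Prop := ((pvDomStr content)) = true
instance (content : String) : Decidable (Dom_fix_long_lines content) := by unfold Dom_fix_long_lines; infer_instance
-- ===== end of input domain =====

-- B replaces A's single stateful character scan (with in-loop index skipping) by a two-pass
-- decomposition: split the line into top-level-comma segments, then greedily merge segments;
-- objective: simpler/alternative decomposition, same result proved equal.

-- ===== PORT A =====
-- A's inner `while i < len(line)` scan: state = (paren_depth, parts, current); the
-- `i += 1 … while line[i] == ' ': i += 1` skipping is `List.dropWhile (· = ' ')` on the rest.
def pvA_break (ind : List Char) : List Char → Int → List (List Char) → List Char →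
    List (List Char) × List Char
  | [], _, parts, current => (parts, current)
  | c :: rest, depth, parts, current =>
    if c = '(' then pvA_break ind rest (depth + 1) parts (current ++ [c])
    else if c = ')' then pvA_break ind rest (depth - 1) parts (current ++ [c])
    else if c = ',' ∧ depth = 0 then
      if 80 < current.length then
        pvA_break ind (rest.dropWhile (· = ' ')) depth (parts ++ [current ++ [',']]) ind
      else pvA_break ind rest depth parts (current ++ [c])
    else pvA_break ind rest depth parts (current ++ [c])
termination_by l => l.length
decreasing_by
  · simp
  · simp
  · exact Nat.lt_succ_of_le (List.length_dropWhile_le _ _)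
  · simp
  · simp

-- the body of A's `for line in lines` loop, acc = (new_lines, count)
def pvA_body (acc : List (List Char) × Int) (line : List Char) : List (List Char) × Int :=
  if 120 < line.length then
    let stripped := PySem.Chars.lstrip line
    if PySem.Chars.startswith stripped ['/', '/'] &&
        (PySem.Chars.isIn ['h','t','t','p'] stripped ||
         PySem.Chars.isIn ['h','t','t','p','s'] stripped) then
      (acc.1 ++ [line], acc.2)
    else if PySem.Chars.startswith stripped ['#'] then
      (acc.1 ++ [line], acc.2)
    else
      let indent := line.length - (PySem.Chars.lstrip line).length
      let indent_str := List.replicate (indent + 4) ' '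
      if PySem.Chars.isIn [','] line && PySem.Chars.isIn ['('] line then
        let pc := pvA_break indent_str line 0 [] []
        if pc.1.isEmpty then (acc.1 ++ [line], acc.2)
        else (acc.1 ++ [PySem.Chars.join ['\n'] (pc.1 ++ [pc.2])], acc.2 + 1)
      else (acc.1 ++ [line], acc.2)
  else (acc.1 ++ [line], acc.2)

def fix_long_lines (content : String) : String × Int :=
  let lines := PySem.Chars.splitOn content.toList ['\n']
  let r := lines.foldl pvA_body ([], 0)
  (String.ofList (PySem.Chars.join ['\n'] r.1), r.2)

-- ===== PORT B =====
-- Source B's `_split_top` loop body, state = (segs, cur, depth)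
def pvB_splitStep (st : List (List Char) × List Char × Int) (ch : Char) :
    List (List Char) × List Char × Int :=
  if ch = '(' then (st.1, st.2.1 ++ [ch], st.2.2 + 1)
  else if ch = ')' then (st.1, st.2.1 ++ [ch], st.2.2 - 1)
  else if ch = ',' ∧ st.2.2 = 0 then (st.1 ++ [st.2.1], [], st.2.2)
  else (st.1, st.2.1 ++ [ch], st.2.2)

def pvB_split (line : List Char) : List (List Char) :=
  let st := line.foldl pvB_splitStep ([], [], 0)
  st.1 ++ [st.2.1]

-- Source B's merging loop body, state = (parts, current); `seg.lstrip(' ')` strips SPACES only,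
-- exactly `List.dropWhile (· = ' ')`.
def pvB_merge (ind : List Char) (st : List (List Char) × List Char) (seg : List Char) :
    List (List Char) × List Char :=
  if 80 < st.2.length then (st.1 ++ [st.2 ++ [',']], ind ++ seg.dropWhile (· = ' '))
  else (st.1, st.2 ++ ',' :: seg)

-- the body of Source B's `for line in …` loop (the early `continue`s become nested ifs)
def pvB_body (acc : List (List Char) × Int) (line : List Char) : List (List Char) × Int :=
  if line.length ≤ 120 then (acc.1 ++ [line], acc.2)
  else
    let stripped := PySem.Chars.lstrip line
    if PySem.Chars.startswith stripped ['/', '/'] &&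
        PySem.Chars.isIn ['h','t','t','p'] stripped then (acc.1 ++ [line], acc.2)
    else if PySem.Chars.startswith stripped ['#'] then (acc.1 ++ [line], acc.2)
    else if PySem.Chars.isIn [','] line && PySem.Chars.isIn ['('] line then
      let indent_str := List.replicate (line.length - stripped.length + 4) ' '
      match pvB_split line with
      | [] => (acc.1 ++ [line], acc.2)  -- unreachable: pvB_split never returns []
      | s0 :: rest =>
        let pc := rest.foldl (pvB_merge indent_str) ([], s0)
        if pc.1.isEmpty then (acc.1 ++ [line], acc.2)
        else (acc.1 ++ [PySem.Chars.join ['\n'] (pc.1 ++ [pc.2])], acc.2 + 1)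
    else (acc.1 ++ [line], acc.2)

def fix_long_lines_alt (content : String) : String × Int :=
  let lines := PySem.Chars.splitOn content.toList ['\n']
  let r := lines.foldl pvB_body ([], 0)
  (String.ofList (PySem.Chars.join ['\n'] r.1), r.2)

-- ===== PRECONDITION & SPEC =====
def Spec_fix_long_lines (content : String) (out : String × Int) : Prop := out = fix_long_lines_alt content
instance (content : String) (out : String × Int) : Decidable (Spec_fix_long_lines content out) := by unfold Spec_fix_long_lines; infer_instance

-- ===== CLAIM (what is proved, stated in full; the proofs are below) =====
def Claim_equal_fix_long_lines : Prop := ∀ (content : String), Dom_fix_long_lines content → Spec_fix_long_lines content (fix_long_lines content)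

-- ===== LEMMAS AND PROOFS =====

-- spec-level segment splitter: (head segment, remaining segments) between top-level commas
def pvSegs : List Char → Int → List Char × List (List Char)
  | [], _ => ([], [])
  | c :: rest, d =>
    if c = '(' then ((c :: (pvSegs rest (d + 1)).1), (pvSegs rest (d + 1)).2)
    else if c = ')' then ((c :: (pvSegs rest (d - 1)).1), (pvSegs rest (d - 1)).2)
    else if c = ',' ∧ d = 0 then ([], (pvSegs rest d).1 :: (pvSegs rest d).2)
    else ((c :: (pvSegs rest d).1), (pvSegs rest d).2)

theorem pvB_split_eq_segs (l : List Char) (segs : List (List Char)) (cur : List Char) (d : Int) :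
    (let st := l.foldl pvB_splitStep (segs, cur, d)
     st.1 ++ [st.2.1]) = segs ++ (cur ++ (pvSegs l d).1) :: (pvSegs l d).2 := by
  induction l generalizing segs cur d with
  | nil => simp [pvSegs]
  | cons c rest ih =>
    simp only [List.foldl_cons, pvB_splitStep, pvSegs]
    split_ifs with h1 h2 h3 <;> simp_all

theorem pvSegs_dropWhile_space (l : List Char) (d : Int) :
    pvSegs (l.dropWhile (· = ' ')) d = ((pvSegs l d).1.dropWhile (· = ' '), (pvSegs l d).2) := by
  induction l generalizing d with
  | nil => simp [pvSegs]
  | cons c rest ih =>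
    by_cases hsp : c = ' '
    · subst hsp
      simp [pvSegs, ih d]
    · rw [List.dropWhile_cons_of_neg (by simp [hsp])]
      simp only [pvSegs]
      split_ifs with h1 h2 h3
      · simp_all
      · simp_all
      · simp
      · rw [List.dropWhile_cons_of_neg (by simp [hsp])]

-- MAIN: A's single scan equals the foldl of B's merge step over the spec segments
theorem pvA_break_eq_merge (ind : List Char) (l : List Char) (d : Int)
    (parts : List (List Char)) (cur : List Char) :
    pvA_break ind l d parts cur =
      (pvSegs l d).2.foldl (pvB_merge ind) (parts, cur ++ (pvSegs l d).1) := by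
  induction hn : l.length using Nat.strong_induction_on generalizing l d parts cur with
  | _ n ih =>
    match l with
    | [] => simp [pvA_break, pvSegs]
    | c :: rest =>
      subst hn
      rw [pvA_break, pvSegs]
      split_ifs with h1 h2 h3 h4
      · rw [ih rest.length (by simp) rest _ _ _ rfl]; simp
      · rw [ih rest.length (by simp) rest _ _ _ rfl]; simp
      · -- top-level comma, current > 80: break
        rw [ih (rest.dropWhile (· = ' ')).length
            (Nat.lt_succ_of_le (List.length_dropWhile_le _ _)) _ _ _ _ rfl]
        rw [pvSegs_dropWhile_space]
        simp only [List.foldl_cons, pvB_merge]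
        rw [if_pos (by simpa using h4)]
        simp
      · -- top-level comma, current ≤ 80: keep
        rw [ih rest.length (by simp) rest _ _ _ rfl]
        obtain ⟨hc, hd⟩ := h3
        subst hc
        simp [pvB_merge, h4]
      · rw [ih rest.length (by simp) rest _ _ _ rfl]; simp

-- "https" in s → "http" in s, so A's double test collapses to B's single one
theorem pv_http_absorb (s : List Char) :
    (PySem.Chars.isIn ['h','t','t','p'] s || PySem.Chars.isIn ['h','t','t','p','s'] s) =
      PySem.Chars.isIn ['h','t','t','p'] s := by
  cases hp : PySem.Chars.isIn ['h','t','t','p'] s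
  · simp only [Bool.false_or]
    cases hq : PySem.Chars.isIn ['h','t','t','p','s'] s
    · rfl
    · exfalso
      rw [PySem.Chars.isIn_iff_infix] at hq
      have : (['h','t','t','p'] : List Char) <:+: s :=
        List.IsInfix.trans (List.IsPrefix.isInfix ⟨['s'], rfl⟩) hq
      rw [← PySem.Chars.isIn_iff_infix] at this
      simp [hp] at this
  · simp

theorem pv_body_eq (acc : List (List Char) × Int) (line : List Char) :
    pvA_body acc line = pvB_body acc line := by
  rw [pvA_body, pvB_body]
  simp only [pv_http_absorb]
  by_cases hlen : 120 < line.length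
  · rw [if_pos hlen, if_neg (show ¬ line.length ≤ 120 by omega)]
    have hsplit : pvB_split line = (pvSegs line 0).1 :: (pvSegs line 0).2 := by
      have := pvB_split_eq_segs line [] [] 0
      simpa [pvB_split] using this
    rw [hsplit, pvA_break_eq_merge]
    simp
  · rw [if_neg hlen, if_pos (by omega)]

-- ===== VERDICT (by name: the statement is the Claim_ definition above) =====
theorem fix_long_lines_spec : Claim_equal_fix_long_lines := by
  intro content _
  unfold Spec_fix_long_lines fix_long_lines fix_long_lines_alt
  rw [show pvA_body = pvB_body from funext fun a => funext fun l => pv_body_eq a l]
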